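-- pv_equiv track=rewrite | github.com/poojithayadavalli/String | String Reflection.py | isReflectionEqual
-- ===== SOURCE A (Python) =====
-- def isReflectionEqual(s):
--     str1 = "AHIMOTUVWXY"
--     n = len(s)
--     for i in range(n):
--         if s[i] not in str1:
--             return False
--     rev = s[::-1]
--     if (rev == s):
--         return True
--     else:
--         return False
-- ===== SOURCE B (Python) =====
-- def isReflectionEqual(s):
--     allowed = set("AHIMOTUVWXY")
--
--     def go(t):
--         if len(t) <= 1:
--             return len(t) == 0 or t[0] in allowed
--         return t[0] in allowed and t[0] == t[-1] and go(t[1:-1])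
--
--     return go(s)
-- ===== Notes on version B (the rewrite author's own statement) =====
-- stated objective: alternative
-- what changed: Replaces A's full membership scan followed by reverse-and-compare with a single recursive peel from both ends that checks membership and the mirror equality together and stops at the first failure.
import Mathlib
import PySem

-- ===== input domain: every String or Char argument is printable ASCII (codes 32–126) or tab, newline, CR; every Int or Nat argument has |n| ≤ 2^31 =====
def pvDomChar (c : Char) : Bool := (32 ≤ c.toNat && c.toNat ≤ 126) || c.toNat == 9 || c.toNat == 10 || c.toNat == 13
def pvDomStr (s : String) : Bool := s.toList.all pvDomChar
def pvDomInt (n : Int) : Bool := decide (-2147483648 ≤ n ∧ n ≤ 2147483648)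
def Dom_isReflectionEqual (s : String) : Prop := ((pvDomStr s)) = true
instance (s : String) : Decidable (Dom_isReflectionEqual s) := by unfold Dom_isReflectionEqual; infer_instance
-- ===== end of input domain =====

-- B replaces A's membership scan + reverse-and-compare with one recursive peel from both ends (alternative decomposition, same result).


-- ===== PORT A =====
-- the allowed-character string str1 (shared literal)
def pvAllowed : List Char := "AHIMOTUVWXY".toList

-- A's for-loop over the characters of s: returns false at the first character not in str1
def pvALoop : List Char → Bool
  | [] => true
  | c :: rest => if pvAllowed.contains c = false then false else pvALoop rest

def isReflectionEqual (s : String) : Bool :=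
  let cs := s.toList
  if pvALoop cs = false then false
  else
    let rev := cs.reverse        -- s[::-1] (PySem.List.slice?_none_none_neg_one: reverse)
    if rev = cs then true else false

-- ===== PORT B =====
-- B's recursive go(t): peel matching allowed characters from both ends
def pvBGo : List Char → Bool
  | [] => true
  | [c] => pvAllowed.contains c
  | c :: d :: rest =>
      pvAllowed.contains c && (c == (d :: rest).getLast (by simp))    -- t[0]==t[-1]
        && pvBGo ((d :: rest).dropLast)                                -- go(t[1:-1])
  termination_by l => l.length
  decreasing_by simp [List.length_dropLast]

def isReflectionEqual_alt (s : String) : Bool := pvBGo s.toList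

-- ===== PRECONDITION & SPEC =====
def Spec_isReflectionEqual (s : String) (out : Bool) : Prop := out = isReflectionEqual_alt s
instance (s : String) (out : Bool) : Decidable (Spec_isReflectionEqual s out) := by unfold Spec_isReflectionEqual; infer_instance

-- ===== CLAIM (what is proved, stated in full; the proofs are below) =====
def Claim_equal_isReflectionEqual : Prop := ∀ (s : String), Dom_isReflectionEqual s → Spec_isReflectionEqual s (isReflectionEqual s)

-- ===== LEMMAS AND PROOFS =====

theorem pvBGo_nil : pvBGo [] = true := by rw [pvBGo.eq_def]

theorem pvBGo_one (c : Char) : pvBGo [c] = pvAllowed.contains c := by rw [pvBGo.eq_def]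

theorem pvBGo_cons2 (c d : Char) (rest : List Char) :
    pvBGo (c :: d :: rest)
      = (pvAllowed.contains c && (c == (d :: rest).getLast (by simp))
          && pvBGo ((d :: rest).dropLast)) := by
  rw [pvBGo.eq_def]

theorem pvALoop_append (xs ys : List Char) :
    pvALoop (xs ++ ys) = (pvALoop xs && pvALoop ys) := by
  induction xs with
  | nil => simp [pvALoop]
  | cons c xs ih =>
      by_cases h : pvAllowed.contains c <;> simp [pvALoop, ih, Bool.and_assoc]

-- one peeling step, expressed on the concat decomposition c :: ys ++ [e]
theorem pv_step (c e : Char) (ys : List Char) :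
    (pvAllowed.contains c && (c == e) && (pvALoop ys && decide (ys.reverse = ys)))
      = (pvALoop (c :: (ys ++ [e])) && decide ((c :: (ys ++ [e])).reverse = c :: (ys ++ [e]))) := by
  by_cases hce : c = e
  · subst hce
    have h1 : pvALoop (c :: (ys ++ [c]))
        = (pvAllowed.contains c && (pvALoop ys && pvAllowed.contains c)) := by
      by_cases hm : c ∈ pvAllowed <;> simp [pvALoop, pvALoop_append, hm]
    have h2 : decide ((c :: (ys ++ [c])).reverse = c :: (ys ++ [c])) = decide (ys.reverse = ys) := by
      apply decide_eq_decide.mpr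
      simp
    rw [h1, h2]
    cases pvAllowed.contains c <;> cases pvALoop ys <;>
      cases h : decide (ys.reverse = ys) <;> simp
  · have h2 : decide ((c :: (ys ++ [e])).reverse = c :: (ys ++ [e])) = false := by
      apply decide_eq_false
      simp only [List.reverse_cons, List.reverse_append, List.reverse_nil, List.nil_append,
        List.cons_append, List.cons.injEq]
      intro h
      exact hce h.1.symm
    have h3 : (c == e) = false := by
      exact beq_eq_false_iff_ne.mpr hce
    rw [h2, h3]
    simp

theorem pvBGo_eq (n : Nat) : ∀ l : List Char, l.length ≤ n →
    pvBGo l = (pvALoop l && decide (l.reverse = l)) := by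
  induction n with
  | zero =>
      intro l hl
      have : l = [] := List.length_eq_zero_iff.mp (Nat.le_zero.mp hl)
      subst this; simp [pvBGo_nil, pvALoop]
  | succ n ih =>
      intro l hl
      match l with
      | [] => simp [pvBGo_nil, pvALoop]
      | [c] =>
          cases h : pvAllowed.contains c <;> simp [pvBGo_one, pvALoop]
      | c :: d :: rest =>
          have ht : (d :: rest : List Char) ≠ [] := by simp
          have hdec : (d :: rest).dropLast ++ [(d :: rest).getLast ht] = d :: rest :=
            List.dropLast_append_getLast ht
          have hlen : ((d :: rest).dropLast).length ≤ n := by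
            simp at hl ⊢; omega
          have hih := ih ((d :: rest).dropLast) hlen
          rw [pvBGo_cons2, hih, pv_step]
          rw [show (c :: ((d :: rest).dropLast ++ [(d :: rest).getLast ht])) = c :: d :: rest by
            rw [hdec]]

theorem isReflectionEqual_eq (s : String) : isReflectionEqual s = isReflectionEqual_alt s := by
  unfold isReflectionEqual isReflectionEqual_alt
  rw [pvBGo_eq s.toList.length s.toList (le_refl _)]
  cases h1 : pvALoop s.toList <;> by_cases h2 : s.toList.reverse = s.toList <;> simp [h1, h2]

-- ===== VERDICT (by name: the statement is the Claim_ definition above) =====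
theorem isReflectionEqual_spec : Claim_equal_isReflectionEqual := by
  unfold Claim_equal_isReflectionEqual Spec_isReflectionEqual
  intro s _
  exact isReflectionEqual_eq s
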